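-- pv_equiv track=rewrite | github.com/BioSystemsUM/propythia | example/enzyme/just_secondfile_run.py | column_name_sequence
-- ===== SOURCE A (Python) =====
-- def column_name_sequence(len_seq, alphabet):
--     columns = []
--     count=1
--     aa=1
--     for x in range(len_seq*len(alphabet)):
--         s='{}_{}'.format(count, aa)
--         count+=1
--         aa+=1
--         if aa == len(alphabet)+1:
--             aa = 1
--         columns.append(s)
--     return columns
-- ===== SOURCE B (Python) =====
-- def column_name_sequence(len_seq, alphabet):
--     L = len(alphabet)
--     return ['{}_{}'.format(row * L + col + 1, col + 1)
--             for row in range(len_seq) for col in range(L)]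
-- ===== Notes on version B (the rewrite author's own statement) =====
-- stated objective: simpler
-- what changed: Replaces A's single flat loop carrying a running counter and an aa counter with an explicit reset branch by two nested ranges over the row/column grid, computing each label directly from its coordinates as row*L+col+1 and col+1 with no mutable state.
import Mathlib
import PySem

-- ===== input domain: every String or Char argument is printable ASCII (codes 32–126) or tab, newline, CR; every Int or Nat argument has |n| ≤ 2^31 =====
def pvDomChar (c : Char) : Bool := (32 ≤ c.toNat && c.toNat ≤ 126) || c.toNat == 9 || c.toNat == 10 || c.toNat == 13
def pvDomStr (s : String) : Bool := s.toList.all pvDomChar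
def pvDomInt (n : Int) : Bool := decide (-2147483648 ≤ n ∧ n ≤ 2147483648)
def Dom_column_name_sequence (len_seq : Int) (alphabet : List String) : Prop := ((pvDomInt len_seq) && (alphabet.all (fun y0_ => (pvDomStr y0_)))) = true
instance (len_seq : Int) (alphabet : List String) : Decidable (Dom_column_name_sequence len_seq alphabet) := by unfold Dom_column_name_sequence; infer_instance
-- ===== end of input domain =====

-- B replaces A's flat loop with mutable count/aa state and a reset branch by two nested
-- ranges over the row/column grid, computing each label directly from its coordinates;
-- same cost, simpler (stateless) decomposition.

-- ===== PORT A =====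
def column_name_sequence (len_seq : Int) (alphabet : List String) : List String :=
  ((PySem.List.pyRange 0 (len_seq * (alphabet.length : Int)) 1).foldl
    (fun st _x =>
      let s := PySem.Int.toStr st.2.1 ++ "_" ++ PySem.Int.toStr st.2.2
      let count := st.2.1 + 1
      let aa := st.2.2 + 1
      let aa := if aa = (alphabet.length : Int) + 1 then 1 else aa
      (st.1 ++ [s], count, aa))
    ([], 1, 1)).1

-- ===== PORT B =====
-- the nested comprehension '[… for row in range(len_seq) for col in range(L)]' is flatMap/map
def column_name_sequence_alt (len_seq : Int) (alphabet : List String) : List String :=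
  (PySem.List.pyRange 0 len_seq 1).flatMap (fun row =>
    (PySem.List.pyRange 0 (alphabet.length : Int) 1).map (fun col =>
      PySem.Int.toStr (row * (alphabet.length : Int) + col + 1) ++ "_" ++
        PySem.Int.toStr (col + 1)))

-- ===== PRECONDITION & SPEC =====
def Spec_column_name_sequence (len_seq : Int) (alphabet : List String) (out : List String) : Prop := out = column_name_sequence_alt len_seq alphabet
instance (len_seq : Int) (alphabet : List String) (out : List String) : Decidable (Spec_column_name_sequence len_seq alphabet out) := by unfold Spec_column_name_sequence; infer_instance

-- ===== CLAIM (what is proved, stated in full; the proofs are below) =====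
def Claim_equal_column_name_sequence : Prop := ∀ (len_seq : Int) (alphabet : List String), Dom_column_name_sequence len_seq alphabet → Spec_column_name_sequence len_seq alphabet (column_name_sequence len_seq alphabet)

-- ===== LEMMAS AND PROOFS =====

-- the i-th string that A appends (0-based), given L = len(alphabet)
def pvF (L : Nat) (i : Nat) : String :=
  PySem.Int.toStr ((i : Int) + 1) ++ "_" ++ PySem.Int.toStr (((i % L : Nat) : Int) + 1)

lemma pv_succ_mod (L i : Nat) (hL : 0 < L) :
    (i + 1) % L = if i % L + 1 = L then 0 else i % L + 1 := by
  rcases Nat.lt_or_ge L 2 with h2 | h2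
  · have hL1 : L = 1 := by omega
    subst hL1; simp [Nat.mod_one]
  · have hm : i % L < L := Nat.mod_lt _ hL
    rw [Nat.add_mod]
    rw [Nat.mod_eq_of_lt (show 1 < L from h2)]
    split
    · next h => rw [h, Nat.mod_self]
    · next h => exact Nat.mod_eq_of_lt (by omega)

-- invariant: after i iterations A's state is (prefix, i+1, i%L+1)
lemma pv_foldA (L : Nat) (hL : 0 < L) (l : List Int) :
    ∀ (i : Nat) (acc : List String),
    l.foldl
      (fun (st : List String × Int × Int) _x =>
        let s := PySem.Int.toStr st.2.1 ++ "_" ++ PySem.Int.toStr st.2.2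
        let count := st.2.1 + 1
        let aa := st.2.2 + 1
        let aa := if aa = (L : Int) + 1 then 1 else aa
        (st.1 ++ [s], count, aa))
      (acc, (i : Int) + 1, ((i % L : Nat) : Int) + 1)
    = (acc ++ (List.range' i l.length).map (pvF L),
       ((i + l.length : Nat) : Int) + 1, (((i + l.length) % L : Nat) : Int) + 1) := by
  induction l with
  | nil => intro i acc; simp
  | cons x xs ih =>
    intro i acc
    simp only [List.foldl_cons]
    have hstate :
        (acc ++ [pvF L i], ((i : Int) + 1) + 1,
          (if (((i % L : Nat) : Int) + 1) + 1 = (L : Int) + 1 then (1 : Int)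
           else (((i % L : Nat) : Int) + 1) + 1))
        = (acc ++ [pvF L i], ((i + 1 : Nat) : Int) + 1, (((i + 1) % L : Nat) : Int) + 1) := by
      refine Prod.ext rfl (Prod.ext (by push_cast; ring) ?_)
      simp only
      rw [pv_succ_mod L i hL]
      by_cases h : i % L + 1 = L
      · rw [if_pos h, if_pos (by push_cast; omega)]
        simp
      · rw [if_neg h, if_neg (by push_cast; omega)]
        push_cast; ring
    show List.foldl _ (acc ++ [pvF L i], ((i : Int) + 1) + 1, _) xs = _
    rw [hstate, ih (i + 1) (acc ++ [pvF L i])]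
    simp only [List.length_cons, List.range'_succ, List.map_cons]
    rw [show i + (xs.length + 1) = i + 1 + xs.length from by omega]
    simp

-- B's nested grid traversal, on natural ranges, equals the flat enumeration by pvF
lemma pv_nest (L : Nat) : ∀ (m : Nat),
    (List.range m).flatMap (fun (row : Nat) =>
      (List.range L).map (fun (col : Nat) =>
        PySem.Int.toStr ((row : Int) * (L : Int) + (col : Int) + 1) ++ "_" ++
          PySem.Int.toStr ((col : Int) + 1)))
    = (List.range (m * L)).map (pvF L) := by
  intro m
  induction m with
  | zero => simp
  | succ m ih =>
    rw [List.range_succ, List.flatMap_append, ih, Nat.succ_mul, List.range_add,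
      List.map_append]
    congr 1
    rw [List.flatMap_cons, List.flatMap_nil, List.append_nil, List.map_map]
    apply List.map_congr_left
    intro c hc
    rw [List.mem_range] at hc
    have hmod : (m * L + c) % L = c := by
      rw [Nat.mul_comm, Nat.mul_add_mod, Nat.mod_eq_of_lt hc]
    simp only [Function.comp, pvF, hmod]
    push_cast; ring_nf

lemma pv_A_char (len_seq : Int) (alphabet : List String) (hL : 0 < alphabet.length)
    (hm : 0 < len_seq) :
    column_name_sequence len_seq alphabet
      = (List.range (len_seq.toNat * alphabet.length)).map (pvF alphabet.length) := by
  unfold column_name_sequence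
  have h0 : ((([] : List String), (1 : Int), (1 : Int)))
      = (([] : List String), ((0 : Nat) : Int) + 1, (((0 % alphabet.length : Nat)) : Int) + 1) := by
    simp
  rw [h0, pv_foldA alphabet.length hL _ 0 []]
  have hlen : (PySem.List.pyRange 0 (len_seq * (alphabet.length : Int)) 1).length
      = len_seq.toNat * alphabet.length := by
    rw [PySem.List.length_pyRange_one]
    have hnn : ((len_seq.toNat : Int)) = len_seq := Int.toNat_of_nonneg (by omega)
    rw [show len_seq * (alphabet.length : Int) - 0
        = ((len_seq.toNat * alphabet.length : Nat) : Int) from by push_cast [hnn]; ring]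
    exact Int.toNat_natCast _
  simp [hlen, List.range_eq_range']

-- ===== VERDICT (by name: the statement is the Claim_ definition above) =====
theorem column_name_sequence_spec : Claim_equal_column_name_sequence := by
  intro len_seq alphabet _
  unfold Spec_column_name_sequence
  by_cases hL : alphabet.length = 0
  · -- empty alphabet: A's range is empty, B's inner range is empty
    unfold column_name_sequence column_name_sequence_alt
    rw [hL]
    simp [PySem.List.pyRange_one_eq_nil (by simp : (0:Int) ≤ 0)]
  · by_cases hm : len_seq ≤ 0
    · -- non-positive len_seq: A's range and B's outer range are empty
      have htot : len_seq * (alphabet.length : Int) ≤ 0 :=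
        mul_nonpos_iff.mpr (Or.inr ⟨hm, by positivity⟩)
      unfold column_name_sequence column_name_sequence_alt
      rw [PySem.List.pyRange_one_eq_nil htot, PySem.List.pyRange_one_eq_nil hm]
      simp
    · have hL' : 0 < alphabet.length := Nat.pos_of_ne_zero hL
      have hm' : 0 < len_seq := by omega
      rw [pv_A_char len_seq alphabet hL' hm']
      unfold column_name_sequence_alt
      rw [← pv_nest alphabet.length len_seq.toNat]
      have hnn : ((len_seq.toNat : Int)) = len_seq := Int.toNat_of_nonneg (by omega)
      rw [PySem.List.pyRange_one 0 len_seq, PySem.List.pyRange_one 0 (alphabet.length : Int)]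
      rw [show (len_seq - 0).toNat = len_seq.toNat from by simp,
        show ((alphabet.length : Int) - 0).toNat = alphabet.length from by simp]
      rw [List.flatMap_map]
      apply List.flatMap_congr
      intro r _
      rw [List.map_map]
      apply List.map_congr_left
      intro c _
      simp
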